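-- pv_equiv track=rewrite | github.com/adambisa/portfolio | 2d array face .py | is_face_on_photo
-- ===== SOURCE A (Python) =====
-- from typing import List
--
-- def is_face_on_photo(photo: List[List[str]]) -> bool:
--
--     def find_all(matrix, element):
--         yield from ((row_no, col_no)
--         for row_no, row in enumerate(matrix)
--         for col_no, matrix_element in enumerate(row)
--         if matrix_element == element)
--
--
--     search= ['f', 'a', 'c', 'e']
--     if len(photo) < 2:
--         return False
--
--
--
--     for i in search:
--         if not any(i in x for x in photo):
--             return False
--
--
--     i=0
--     for i in range(len(search)):
--         for x,y in find_all(photo, search[i]):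
--             vzdialenost=abs(x-y)
--             if vzdialenost >=0 and vzdialenost <= 1:
--                 return True
-- ===== SOURCE B (Python) =====
-- def is_face_on_photo(photo):
--     if len(photo) < 2:
--         return False
--     seen = set()
--     near = False
--     for r, row in enumerate(photo):
--         for c, cell in enumerate(row):
--             if cell in ('f', 'a', 'c', 'e'):
--                 seen.add(cell)
--                 if abs(r - c) <= 1:
--                     near = True
--     return len(seen) == 4 and near
-- ===== Notes on version B (the rewrite author's own statement) =====
-- stated objective: simpler
-- what changed: Replaces the four separate presence scans plus per-letter find_all scans with one fused pass over all cells maintaining a set of seen face letters and a near-diagonal flag.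
import Mathlib
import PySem

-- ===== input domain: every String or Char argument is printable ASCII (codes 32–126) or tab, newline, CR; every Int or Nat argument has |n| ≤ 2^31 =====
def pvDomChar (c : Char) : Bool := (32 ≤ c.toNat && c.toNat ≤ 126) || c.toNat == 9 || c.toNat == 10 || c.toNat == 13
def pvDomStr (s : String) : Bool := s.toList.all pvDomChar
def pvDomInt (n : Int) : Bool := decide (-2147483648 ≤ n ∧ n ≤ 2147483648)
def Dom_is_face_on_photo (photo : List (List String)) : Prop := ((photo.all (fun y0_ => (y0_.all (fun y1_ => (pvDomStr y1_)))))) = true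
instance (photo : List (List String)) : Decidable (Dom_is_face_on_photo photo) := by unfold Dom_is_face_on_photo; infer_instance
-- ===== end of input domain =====

-- B fuses A's four presence scans and per-letter find_all scans into one pass over all
-- cells keeping a set of seen face letters and a near-diagonal flag (objective: simpler).

-- ===== PORT A =====
-- find_all(matrix, element): generator of (row_no, col_no) with matrix[row_no][col_no] == element
def pvFindAll (matrix : List (List String)) (element : String) : List (Int × Int) :=
  (PySem.List.enumerate matrix).flatMap (fun rr =>
    (PySem.List.enumerate rr.2).filterMap (fun cc =>
      if cc.2 == element then some (rr.1, cc.1) else none))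

-- Python A falls off the end (returns None, not a bool) when all four letters are present
-- but none lies near the diagonal; Pre_ excludes exactly those inputs, and there the port
-- just returns the final any's false.
def is_face_on_photo (photo : List (List String)) : Bool :=
  let search : List String := ["f", "a", "c", "e"]
  if photo.length < 2 then false
  else if search.any (fun i => !(photo.any (fun x => x.contains i))) then false
  else
    (List.range search.length).any (fun i =>
      (pvFindAll photo (search.getD i "")).any (fun xy =>
        let vzdialenost : Int := |xy.1 - xy.2|
        decide (0 ≤ vzdialenost) && decide (vzdialenost ≤ 1)))

-- ===== PORT B =====
def pvIsFaceLetter (s : String) : Bool := s == "f" || s == "a" || s == "c" || s == "e"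

def pvScanRow (r : Int) (row : List String) (acc : PySem.Set String × Bool) :
    PySem.Set String × Bool :=
  (PySem.List.enumerate row).foldl (fun acc2 cc =>
    if pvIsFaceLetter cc.2 then
      (PySem.Set.add acc2.1 cc.2, acc2.2 || decide (|r - cc.1| ≤ 1))
    else acc2) acc

def is_face_on_photo_alt (photo : List (List String)) : Bool :=
  if photo.length < 2 then false
  else
    let st := (PySem.List.enumerate photo).foldl
      (fun acc rr => pvScanRow rr.1 rr.2 acc) (PySem.Set.empty, false)
    decide (st.1.length = 4) && st.2

-- ===== PRECONDITION & SPEC =====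
-- Pre_ excludes exactly the inputs on which Python A returns None instead of a bool
-- (len ≥ 2, all four of 'f','a','c','e' present, but no face letter within 1 of the diagonal).
def Pre_is_face_on_photo (photo : List (List String)) : Prop :=
  photo.length < 2 ∨
  (∃ s ∈ (["f", "a", "c", "e"] : List String), ∀ row ∈ photo, s ∉ row) ∨
  (∃ rr ∈ PySem.List.enumerate photo, ∃ cc ∈ PySem.List.enumerate rr.2,
    cc.2 ∈ (["f", "a", "c", "e"] : List String) ∧ |rr.1 - cc.1| ≤ 1)
instance (photo : List (List String)) : Decidable (Pre_is_face_on_photo photo) := by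
  unfold Pre_is_face_on_photo; infer_instance

def pvWitness_is_face_on_photo : List (List String) := [["f", "a"], ["c", "e"]]

def Spec_is_face_on_photo (photo : List (List String)) (out : Bool) : Prop := out = is_face_on_photo_alt photo
instance (photo : List (List String)) (out : Bool) : Decidable (Spec_is_face_on_photo photo out) := by unfold Spec_is_face_on_photo; infer_instance

-- ===== CLAIM (what is proved, stated in full; the proofs are below) =====
def Claim_equal_is_face_on_photo : Prop := ∀ (photo : List (List String)), Dom_is_face_on_photo photo → Pre_is_face_on_photo photo → Spec_is_face_on_photo photo (is_face_on_photo photo)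

-- ===== LEMMAS AND PROOFS =====

-- shorthand used only in the proofs
def pvFaces : List String := ["f", "a", "c", "e"]

theorem pvIsFaceLetter_iff (s : String) : pvIsFaceLetter s = true ↔ s ∈ pvFaces := by
  simp only [pvIsFaceLetter, Bool.or_eq_true, beq_iff_eq, pvFaces, List.mem_cons]
  tauto

-- occurrence of a string as a cell, phrased over enumerate
def pvOcc (photo : List (List String)) (s : String) : Prop :=
  ∃ rr ∈ PySem.List.enumerate photo, ∃ cc ∈ PySem.List.enumerate rr.2, cc.2 = s

theorem pvOcc_iff (photo : List (List String)) (s : String) :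
    pvOcc photo s ↔ ∃ row ∈ photo, s ∈ row := by
  unfold pvOcc
  constructor
  · rintro ⟨rr, hrr, cc, hcc, rfl⟩
    refine ⟨rr.2, ?_, ?_⟩
    · have := List.mem_map_of_mem (f := Prod.snd) hrr
      simpa [PySem.List.map_snd_enumerate] using this
    · have := List.mem_map_of_mem (f := Prod.snd) hcc
      simpa [PySem.List.map_snd_enumerate] using this
  · rintro ⟨row, hrow, hs⟩
    have h1 : row ∈ (PySem.List.enumerate photo).map Prod.snd := by
      simpa [PySem.List.map_snd_enumerate] using hrow
    obtain ⟨rr, hrr, hr2⟩ := List.mem_map.1 h1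
    have h2 : s ∈ (PySem.List.enumerate row).map Prod.snd := by
      simpa [PySem.List.map_snd_enumerate] using hs
    obtain ⟨cc, hcc, hc2⟩ := List.mem_map.1 h2
    exact ⟨rr, hrr, cc, by rw [hr2]; exact hcc, hc2⟩

-- ---- B-side fold characterisation ----

theorem pvInner_snd (r : Int) (l : List (Int × String)) (acc : PySem.Set String × Bool) :
    (l.foldl (fun acc2 cc =>
      if pvIsFaceLetter cc.2 then
        (PySem.Set.add acc2.1 cc.2, acc2.2 || decide (|r - cc.1| ≤ 1))
      else acc2) acc).2
    = (acc.2 || l.any (fun cc => pvIsFaceLetter cc.2 && decide (|r - cc.1| ≤ 1))) := by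
  induction l generalizing acc with
  | nil => simp
  | cons c l ih =>
    by_cases h : pvIsFaceLetter c.2 = true
    · simp [List.foldl_cons, h, ih, Bool.or_assoc]
    · simp [List.foldl_cons, h, ih]

theorem pvInner_mem (r : Int) (l : List (Int × String)) (acc : PySem.Set String × Bool)
    (s : String) :
    (s ∈ (l.foldl (fun acc2 cc =>
      if pvIsFaceLetter cc.2 then
        (PySem.Set.add acc2.1 cc.2, acc2.2 || decide (|r - cc.1| ≤ 1))
      else acc2) acc).1)
    ↔ (s ∈ acc.1 ∨ ∃ cc ∈ l, pvIsFaceLetter cc.2 = true ∧ cc.2 = s) := by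
  induction l generalizing acc with
  | nil => simp
  | cons c l ih =>
    by_cases h : pvIsFaceLetter c.2 = true
    · simp only [List.foldl_cons, h, if_pos, ih, PySem.Set.mem_add, List.mem_cons]
      constructor
      · rintro (⟨h1 | h1⟩ | ⟨cc, hcc, hf, rfl⟩)
        · exact Or.inl h1
        · exact Or.inr ⟨c, Or.inl rfl, h, h1.symm⟩
        · exact Or.inr ⟨cc, Or.inr hcc, hf, rfl⟩
      · rintro (h1 | ⟨cc, (rfl | hcc), hf, rfl⟩)
        · exact Or.inl (Or.inl h1)
        · exact Or.inl (Or.inr rfl)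
        · exact Or.inr ⟨cc, hcc, hf, rfl⟩
    · simp only [List.foldl_cons, h, ih, List.mem_cons]
      constructor
      · rintro (h1 | ⟨cc, hcc, hf, rfl⟩)
        · exact Or.inl h1
        · exact Or.inr ⟨cc, Or.inr hcc, hf, rfl⟩
      · rintro (h1 | ⟨cc, (rfl | hcc), hf, rfl⟩)
        · exact Or.inl h1
        · exact absurd hf h
        · exact Or.inr ⟨cc, hcc, hf, rfl⟩

theorem pvInner_nodup (r : Int) (l : List (Int × String)) (acc : PySem.Set String × Bool)
    (h : acc.1.Nodup) :
    (l.foldl (fun acc2 cc =>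
      if pvIsFaceLetter cc.2 then
        (PySem.Set.add acc2.1 cc.2, acc2.2 || decide (|r - cc.1| ≤ 1))
      else acc2) acc).1.Nodup := by
  induction l generalizing acc with
  | nil => simpa
  | cons c l ih =>
    by_cases hc : pvIsFaceLetter c.2 = true
    · simp only [List.foldl_cons, hc, if_pos]
      exact ih _ (PySem.Set.nodup_add (s := acc.1) c.2 h)
    · simp only [List.foldl_cons, hc]
      exact ih _ h

theorem pvOuter_snd (l : List (Int × List String)) (acc : PySem.Set String × Bool) :
    (l.foldl (fun a rr => pvScanRow rr.1 rr.2 a) acc).2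
    = (acc.2 || l.any (fun rr => (PySem.List.enumerate rr.2).any
        (fun cc => pvIsFaceLetter cc.2 && decide (|rr.1 - cc.1| ≤ 1)))) := by
  induction l generalizing acc with
  | nil => simp
  | cons x l ih =>
    rw [List.foldl_cons, ih, List.any_cons]
    rw [pvScanRow, pvInner_snd]
    simp [Bool.or_assoc]

theorem pvOuter_mem (l : List (Int × List String)) (acc : PySem.Set String × Bool)
    (s : String) :
    (s ∈ (l.foldl (fun a rr => pvScanRow rr.1 rr.2 a) acc).1)
    ↔ (s ∈ acc.1 ∨ ∃ rr ∈ l, ∃ cc ∈ PySem.List.enumerate rr.2,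
        pvIsFaceLetter cc.2 = true ∧ cc.2 = s) := by
  induction l generalizing acc with
  | nil => simp
  | cons x l ih =>
    rw [List.foldl_cons, ih, pvScanRow, pvInner_mem]
    constructor
    · rintro (⟨h1 | ⟨cc, hcc, hf, rfl⟩⟩ | ⟨rr, hrr, cc, hcc, hf, rfl⟩)
      · exact Or.inl h1
      · exact Or.inr ⟨x, List.mem_cons_self .., cc, hcc, hf, rfl⟩
      · exact Or.inr ⟨rr, List.mem_cons_of_mem _ hrr, cc, hcc, hf, rfl⟩
    · rintro (h1 | ⟨rr, hrr, cc, hcc, hf, rfl⟩)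
      · exact Or.inl (Or.inl h1)
      · rcases List.mem_cons.1 hrr with rfl | hrr
        · exact Or.inl (Or.inr ⟨cc, hcc, hf, rfl⟩)
        · exact Or.inr ⟨rr, hrr, cc, hcc, hf, rfl⟩

theorem pvOuter_nodup (l : List (Int × List String)) (acc : PySem.Set String × Bool)
    (h : acc.1.Nodup) :
    (l.foldl (fun a rr => pvScanRow rr.1 rr.2 a) acc).1.Nodup := by
  induction l generalizing acc with
  | nil => simpa
  | cons x l ih =>
    rw [List.foldl_cons]
    exact ih _ (by rw [pvScanRow]; exact pvInner_nodup _ _ _ h)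

-- a nodup sublist of the four face letters has length 4 iff it contains all four
theorem pvLen4 (S : List String) (hn : S.Nodup) (hsub : ∀ x ∈ S, x ∈ pvFaces) :
    S.length = 4 ↔ ∀ x ∈ pvFaces, x ∈ S := by
  have hF : pvFaces.Nodup := by decide
  constructor
  · intro h x hx
    have hsp := List.subperm_of_subset hn hsub
    have hperm : S.Perm pvFaces := hsp.perm_of_length_le (by simp [pvFaces, h])
    exact hperm.mem_iff.2 hx
  · intro h
    have hperm : S.Perm pvFaces :=
      (List.perm_ext_iff_of_nodup hn hF).2 (fun a => ⟨fun ha => hsub a ha, fun ha => h a ha⟩)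
    simpa [pvFaces] using hperm.length_eq

-- ---- A-side characterisations ----

theorem pvFindAll_mem (photo : List (List String)) (e : String) (p : Int × Int) :
    p ∈ pvFindAll photo e ↔
      ∃ rr ∈ PySem.List.enumerate photo, ∃ cc ∈ PySem.List.enumerate rr.2,
        cc.2 = e ∧ p = (rr.1, cc.1) := by
  simp only [pvFindAll, List.mem_flatMap, List.mem_filterMap]
  constructor
  · rintro ⟨rr, hrr, cc, hcc, hif⟩
    by_cases h : cc.2 == e
    · simp only [h, if_pos] at hif
      exact ⟨rr, hrr, cc, hcc, by simpa using h, (Option.some.inj hif).symm⟩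
    · simp [h] at hif
  · rintro ⟨rr, hrr, cc, hcc, he, rfl⟩
    exact ⟨rr, hrr, cc, hcc, by simp [he]⟩

-- A's trailing scan equals "some face-letter cell lies within 1 of the diagonal"
theorem pvA_scan (photo : List (List String)) :
    ((List.range (pvFaces.length)).any (fun i =>
      (pvFindAll photo (pvFaces.getD i "")).any (fun xy =>
        let vzdialenost : Int := |xy.1 - xy.2|
        decide (0 ≤ vzdialenost) && decide (vzdialenost ≤ 1))))
    = ((PySem.List.enumerate photo).any (fun rr => (PySem.List.enumerate rr.2).any
        (fun cc => pvIsFaceLetter cc.2 && decide (|rr.1 - cc.1| ≤ 1)))) := by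
  rw [Bool.eq_iff_iff]
  simp only [List.any_eq_true, List.mem_range, Bool.and_eq_true, decide_eq_true_eq]
  constructor
  · rintro ⟨i, hi, p, hp, _, hle⟩
    obtain ⟨rr, hrr, cc, hcc, he, rfl⟩ := (pvFindAll_mem photo _ p).1 hp
    refine ⟨rr, hrr, cc, hcc, ?_, by simpa using hle⟩
    rw [pvIsFaceLetter_iff, he]
    have hi' : i < 4 := by simpa [pvFaces] using hi
    interval_cases i <;> simp [pvFaces]
  · rintro ⟨rr, hrr, cc, hcc, hf, hle⟩
    have hmem := (pvIsFaceLetter_iff cc.2).1 hf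
    have : ∃ i, i < pvFaces.length ∧ pvFaces.getD i "" = cc.2 := by
      simp only [pvFaces, List.mem_cons, List.not_mem_nil, or_false] at hmem ⊢
      rcases hmem with h | h | h | h
      · exact ⟨0, by simp, by simp [h]⟩
      · exact ⟨1, by simp, by simp [h]⟩
      · exact ⟨2, by simp, by simp [h]⟩
      · exact ⟨3, by simp, by simp [h]⟩
    obtain ⟨i, hi, hgi⟩ := this
    refine ⟨i, hi, (rr.1, cc.1), ?_, abs_nonneg _, by simpa using hle⟩
    exact (pvFindAll_mem photo _ _).2 ⟨rr, hrr, cc, hcc, hgi.symm ▸ rfl, rfl⟩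

theorem pvOccB_iff (photo : List (List String)) (s : String) :
    (photo.any (fun x => x.contains s)) = true ↔ pvOcc photo s := by
  rw [pvOcc_iff]
  simp

-- main unconditional equality of the two ports
theorem pv_main (photo : List (List String)) :
    is_face_on_photo photo = is_face_on_photo_alt photo := by
  unfold is_face_on_photo is_face_on_photo_alt
  by_cases hlen : photo.length < 2
  · simp [hlen]
  · simp only [if_neg hlen]
    set st := (PySem.List.enumerate photo).foldl
      (fun acc rr => pvScanRow rr.1 rr.2 acc) (PySem.Set.empty, false) with hst
    have hnodup : st.1.Nodup := pvOuter_nodup _ _ (by simp [PySem.Set.empty])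
    have hmem : ∀ s, s ∈ st.1 ↔ (pvIsFaceLetter s = true ∧ pvOcc photo s) := by
      intro s
      rw [hst, pvOuter_mem]
      unfold pvOcc
      constructor
      · rintro (h | ⟨rr, hrr, cc, hcc, hf, rfl⟩)
        · simp [PySem.Set.empty] at h
        · exact ⟨hf, rr, hrr, cc, hcc, rfl⟩
      · rintro ⟨hf, rr, hrr, cc, hcc, rfl⟩
        exact Or.inr ⟨rr, hrr, cc, hcc, hf, rfl⟩
    have hsub : ∀ x ∈ st.1, x ∈ pvFaces := fun x hx =>
      (pvIsFaceLetter_iff x).1 ((hmem x).1 hx).1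
    have hsnd : st.2 = ((PySem.List.enumerate photo).any (fun rr =>
        (PySem.List.enumerate rr.2).any
          (fun cc => pvIsFaceLetter cc.2 && decide (|rr.1 - cc.1| ≤ 1)))) := by
      rw [hst, pvOuter_snd]; simp
    by_cases hall : ∀ x ∈ pvFaces, pvOcc photo x
    · -- all four letters present: A's missing-check fails, both reduce to the scan
      have hmiss : ((["f", "a", "c", "e"] : List String).any
          (fun i => !(photo.any (fun x => x.contains i)))) = false := by
        rw [List.any_eq_false]
        intro s hs
        have h2 := (pvOccB_iff photo s).2 (hall s (by simpa [pvFaces] using hs))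
        rw [h2, Bool.not_true]
        simp
      have h4 : st.1.length = 4 :=
        (pvLen4 st.1 hnodup hsub).2 (fun x hx => (hmem x).2 ⟨(pvIsFaceLetter_iff x).2 hx, hall x hx⟩)
      rw [hmiss, if_neg (by simp)]
      rw [h4, hsnd]
      have := pvA_scan photo
      simp only [pvFaces] at this
      rw [this]
      simp
    · -- some letter missing: A returns false at the missing-check; B's set is too small
      rw [not_forall] at hall
      obtain ⟨s, hall⟩ := hall
      rw [_root_.not_imp] at hall
      obtain ⟨hs, hnocc⟩ := hall
      have hmiss : ((["f", "a", "c", "e"] : List String).any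
          (fun i => !(photo.any (fun x => x.contains i)))) = true := by
        simp only [List.any_eq_true]
        refine ⟨s, by simpa [pvFaces] using hs, ?_⟩
        have : photo.any (fun x => x.contains s) = false := by
          cases h : photo.any (fun x => x.contains s)
          · rfl
          · exact absurd ((pvOccB_iff photo s).1 h) hnocc
        rw [this, Bool.not_false]
      have h4 : st.1.length ≠ 4 := by
        intro h
        exact hnocc ((hmem s).1 ((pvLen4 st.1 hnodup hsub).1 h s hs)).2
      rw [hmiss, if_pos rfl]
      simp [h4]

-- ===== VERDICT (by name: the statement is the Claim_ definition above) =====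
theorem is_face_on_photo_spec : Claim_equal_is_face_on_photo := by
  intro photo _ _
  unfold Spec_is_face_on_photo
  exact pv_main photo
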